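-- pv_equiv track=rewrite | github.com/EdwardJKim/adventofcode2018 | day02/part1.py | count
-- ===== SOURCE A (Python) =====
-- from collections import Counter
-- from typing import List, Tuple
--
-- def count(s: str) -> Tuple[int, int]:
--
--     counter = Counter(s)
--     twos = threes = 0
--
--     for k, v in counter.items():
--         if v == 2:
--             twos = 1
--         if v == 3:
--             threes = 1
--
--     return twos, threes
-- ===== SOURCE B (Python) =====
-- def count(s):
--     lengths = []
--     rest = sorted(s)
--     while rest:
--         x = rest[0]
--         k = 1
--         while k < len(rest) and rest[k] == x:
--             k += 1
--         lengths.append(k)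
--         rest = rest[k:]
--     return (int(2 in lengths), int(3 in lengths))
-- ===== Notes on version B (the rewrite author's own statement) =====
-- stated objective: alternative
-- what changed: Replaces the Counter hash-frequency dict and flag loop by sorting the characters and scanning the sorted list once, emitting each equal run's length, then testing membership of 2 and 3 in the run-length list.
import Mathlib
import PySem

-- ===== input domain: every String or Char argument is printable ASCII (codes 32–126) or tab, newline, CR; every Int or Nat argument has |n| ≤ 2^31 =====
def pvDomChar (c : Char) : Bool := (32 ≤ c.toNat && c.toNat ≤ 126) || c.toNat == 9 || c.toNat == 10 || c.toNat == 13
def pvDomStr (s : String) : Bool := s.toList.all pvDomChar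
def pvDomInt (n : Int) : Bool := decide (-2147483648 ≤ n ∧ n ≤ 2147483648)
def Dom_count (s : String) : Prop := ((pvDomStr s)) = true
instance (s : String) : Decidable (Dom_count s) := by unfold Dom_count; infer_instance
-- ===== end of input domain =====

-- B replaces A's Counter frequency dict by sorting the characters and scanning equal runs; same result, alternative algorithm.

-- ===== PORT A =====
def count (s : String) : Int × Int :=
  let counter := PySem.Dict.counter s.toList
  counter.items.foldl
    (fun (acc : Int × Int) kv =>
      let twos := if kv.2 == (2 : Int) then (1 : Int) else acc.1
      let threes := if kv.2 == (3 : Int) then (1 : Int) else acc.2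
      (twos, threes))
    (0, 0)

-- ===== PORT B =====
-- one step per equal run of the sorted list: k = 1 + length of the equal prefix, tail = the rest
def runLengths : List Char → List Nat
  | [] => []
  | x :: xs =>
    (1 + (xs.takeWhile (· == x)).length) :: runLengths (xs.dropWhile (· == x))
termination_by l => l.length
decreasing_by
  exact Nat.lt_succ_of_le (List.length_dropWhile_le _ _)

def count_alt (s : String) : Int × Int :=
  let lengths := runLengths (PySem.List.sorted s.toList (fun c => c) false)
  ((if 2 ∈ lengths then (1 : Int) else 0), (if 3 ∈ lengths then (1 : Int) else 0))

-- ===== PRECONDITION & SPEC =====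
def Spec_count (s : String) (out : Int × Int) : Prop := out = count_alt s
instance (s : String) (out : Int × Int) : Decidable (Spec_count s out) := by unfold Spec_count; infer_instance

-- ===== CLAIM (what is proved, stated in full; the proofs are below) =====
def Claim_equal_count : Prop := ∀ (s : String), Dom_count s → Spec_count s (count s)

-- ===== LEMMAS AND PROOFS =====

-- A's flag loop returns 1 in a component iff some counter value equals the target
lemma foldA_eq (l : List (Char × Int)) (t th : Int) :
    l.foldl
      (fun (acc : Int × Int) kv =>
        let twos := if kv.2 == (2 : Int) then (1 : Int) else acc.1
        let threes := if kv.2 == (3 : Int) then (1 : Int) else acc.2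
        (twos, threes))
      (t, th)
    = ((if l.any (fun kv => kv.2 == (2 : Int)) then 1 else t),
       (if l.any (fun kv => kv.2 == (3 : Int)) then 1 else th)) := by
  induction l generalizing t th with
  | nil => simp
  | cons kv rest ih =>
    simp only [List.foldl_cons, List.any_cons, ih]
    by_cases h2 : kv.2 = (2 : Int) <;> by_cases h3 : kv.2 = (3 : Int) <;>
      simp [h2, h3]

-- run lengths of a sorted list are exactly the multiplicities of its members
lemma mem_runLengths (l : List Char) (hl : l.Pairwise (· ≤ ·)) (m : Nat) :
    m ∈ runLengths l ↔ ∃ c ∈ l, l.count c = m := by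
  induction l using runLengths.induct with
  | case1 => simp [runLengths]
  | case2 x xs ih =>
    rcases List.pairwise_cons.mp hl with ⟨hx, hp⟩
    have htw : ∀ c ∈ xs.takeWhile (· == x), c = x := by
      intro c hc
      have h := List.mem_takeWhile_imp hc
      simpa using h
    have hdw_pair : (xs.dropWhile (· == x)).Pairwise (· ≤ ·) :=
      hp.sublist (List.dropWhile_sublist _)
    have hdw_ne : ∀ c ∈ xs.dropWhile (· == x), c ≠ x := by
      intro c hc
      cases hdwe : xs.dropWhile (· == x) with
      | nil => rw [hdwe] at hc; simp at hc
      | cons d ds =>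
        have hw : xs.dropWhile (· == x) ≠ [] := by simp [hdwe]
        have h0 := List.head_dropWhile_not (fun c => c == x) hw
        simp only [hdwe, List.head_cons] at h0
        have hdx : x < d := by
          have hdmem : d ∈ xs := (List.dropWhile_sublist _).mem (by rw [hdwe]; exact List.mem_cons_self)
          exact lt_of_le_of_ne (hx d hdmem) (by intro h; subst h; simp at h0)
        rw [hdwe] at hc
        rcases List.mem_cons.mp hc with rfl | hc2
        · exact ne_of_gt hdx
        · have hdc : d ≤ c := (List.pairwise_cons.mp (hdwe ▸ hdw_pair)).1 c hc2
          exact ne_of_gt (lt_of_lt_of_le hdx hdc)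
    have hsplit : xs = xs.takeWhile (· == x) ++ xs.dropWhile (· == x) :=
      (List.takeWhile_append_dropWhile).symm
    have hcount_tw : ∀ c, (xs.takeWhile (· == x)).count c =
        if c = x then (xs.takeWhile (· == x)).length else 0 := by
      intro c
      split_ifs with h
      · subst h; exact List.count_eq_length.mpr fun b hb => (htw b hb).symm
      · exact List.count_eq_zero.mpr fun hc => h (htw c hc)
    have hcount_x : (x :: xs).count x = 1 + (xs.takeWhile (· == x)).length := by
      rw [List.count_cons_self]
      conv_lhs => rw [hsplit]
      rw [List.count_append, hcount_tw x, if_pos rfl,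
        List.count_eq_zero.mpr (fun hc => (hdw_ne x hc) rfl)]
      omega
    have hcount_dw : ∀ c ∈ xs.dropWhile (· == x),
        (x :: xs).count c = (xs.dropWhile (· == x)).count c := by
      intro c hc
      rw [List.count_cons_of_ne (Ne.symm (hdw_ne c hc))]
      conv_lhs => rw [hsplit]
      rw [List.count_append, hcount_tw c, if_neg (hdw_ne c hc), Nat.zero_add]
    simp only [runLengths, List.mem_cons]
    constructor
    · rintro (rfl | hm)
      · exact ⟨x, Or.inl rfl, hcount_x⟩
      · rcases (ih hdw_pair).mp hm with ⟨c, hc, hcnt⟩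
        exact ⟨c, Or.inr ((List.dropWhile_sublist _).mem hc),
          by rw [hcount_dw c hc]; exact hcnt⟩
    · rintro ⟨c, hc, hcnt⟩
      rcases hc with rfl | hc
      · left; rw [← hcnt, hcount_x]
      · rw [hsplit, List.mem_append] at hc
        rcases hc with hc | hc
        · left; rw [← hcnt, htw c hc, hcount_x]
        · right
          exact (ih hdw_pair).mpr ⟨c, hc, by rw [← hcount_dw c hc]; exact hcnt⟩

lemma exists_count_iff (s : String) (m : Nat) :
    (m ∈ runLengths (PySem.List.sorted s.toList (fun c => c) false)) ↔
      ∃ c ∈ s.toList, s.toList.count c = m := by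
  have hperm := PySem.List.sorted_perm s.toList (fun c => c) false
  rw [mem_runLengths _ (by simpa using PySem.List.sorted_pairwise s.toList (fun c => c)) m]
  constructor
  · rintro ⟨c, hc, hcnt⟩
    exact ⟨c, hperm.mem_iff.mp hc, by rw [← hperm.count_eq]; exact hcnt⟩
  · rintro ⟨c, hc, hcnt⟩
    exact ⟨c, hperm.mem_iff.mpr hc, by rw [hperm.count_eq]; exact hcnt⟩

lemma any_items_iff (s : String) (v : Int) :
    ((PySem.Dict.counter s.toList).items.any (fun kv => kv.2 == v)) = true ↔
      ∃ c ∈ s.toList, (s.toList.count c : Int) = v := by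
  rw [PySem.Dict.items_counter]
  simp only [List.any_map, List.any_eq_true, Function.comp, beq_iff_eq]
  constructor
  · rintro ⟨c, hc, h⟩
    exact ⟨c, (PySem.Set.mem_ofList _ _).mp hc, h⟩
  · rintro ⟨c, hc, h⟩
    exact ⟨c, (PySem.Set.mem_ofList _ _).mpr hc, h⟩

-- ===== VERDICT (by name: the statement is the Claim_ definition above) =====
theorem count_spec : Claim_equal_count := by
  intro s _
  unfold Spec_count count count_alt
  simp only [foldA_eq]
  congr 1
  · by_cases h : ∃ c ∈ s.toList, s.toList.count c = 2
    · rw [if_pos ((any_items_iff s 2).mpr (by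
          rcases h with ⟨c, hc, hcnt⟩; exact ⟨c, hc, by exact_mod_cast hcnt⟩)),
        if_pos ((exists_count_iff s 2).mpr h)]
    · rw [if_neg (fun hh => h (by
          rcases (any_items_iff s 2).mp hh with ⟨c, hc, hcnt⟩
          exact ⟨c, hc, by exact_mod_cast hcnt⟩)),
        if_neg (fun hh => h ((exists_count_iff s 2).mp hh))]
  · by_cases h : ∃ c ∈ s.toList, s.toList.count c = 3
    · rw [if_pos ((any_items_iff s 3).mpr (by
          rcases h with ⟨c, hc, hcnt⟩; exact ⟨c, hc, by exact_mod_cast hcnt⟩)),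
        if_pos ((exists_count_iff s 3).mpr h)]
    · rw [if_neg (fun hh => h (by
          rcases (any_items_iff s 3).mp hh with ⟨c, hc, hcnt⟩
          exact ⟨c, hc, by exact_mod_cast hcnt⟩)),
        if_neg (fun hh => h ((exists_count_iff s 3).mp hh))]
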